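-- pv_equiv track=rewrite | github.com/mattgidsy/mattgidsy | Code/Wordle_bot/word-power_alpha-test.py | count_letter_positions
-- ===== SOURCE A (Python) =====
-- from collections import defaultdict
-- import string
--
-- def count_letter_positions(words):
--     # Initialize a dictionary to hold counts of letters at each position
--     position_counts = defaultdict(lambda: defaultdict(int))
--
--     # Iterate over each word and its position index
--     for word in words:
--         for index, letter in enumerate(word.lower()):
--             if letter in string.ascii_lowercase:
--                 position_counts[index][letter] += 1
--
--     # Convert defaultdict to a regular dict for easier handling/display
--     position_counts = dict(position_counts)
--
--     return position_counts
-- ===== SOURCE B (Python) =====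
-- from collections import defaultdict, Counter
-- import string
--
-- def count_letter_positions(words):
--     # Phase 1: flatten to a stream of (position, letter) events and count them once.
--     events = [(i, ch)
--               for word in words
--               for i, ch in enumerate(word.lower())
--               if ch in string.ascii_lowercase]
--     flat = Counter(events)
--     # Phase 2: regroup the flat counter into the nested dict-of-defaultdicts shape.
--     position_counts = {}
--     for (index, letter), count in flat.items():
--         position_counts.setdefault(index, defaultdict(int))[letter] = count
--     return position_counts
-- ===== Notes on version B (the rewrite author's own statement) =====
-- stated objective: alternative
-- what changed: Replaces A's single pass of nested defaultdict increments with a two-phase build: a flat comprehension of (position, letter) events counted once by Counter, then one reshape loop that regroups the flat counts into the nested dict via setdefault.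
import Mathlib
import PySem

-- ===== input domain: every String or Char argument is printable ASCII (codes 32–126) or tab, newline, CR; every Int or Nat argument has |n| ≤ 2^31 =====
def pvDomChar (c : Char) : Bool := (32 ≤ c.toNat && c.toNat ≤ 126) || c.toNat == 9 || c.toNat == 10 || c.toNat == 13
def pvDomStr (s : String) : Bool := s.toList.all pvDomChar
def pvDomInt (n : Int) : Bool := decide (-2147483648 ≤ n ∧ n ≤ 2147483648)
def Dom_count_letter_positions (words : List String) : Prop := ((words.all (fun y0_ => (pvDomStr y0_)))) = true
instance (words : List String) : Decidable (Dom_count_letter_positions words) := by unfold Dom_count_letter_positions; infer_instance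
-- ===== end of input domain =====

-- B rebuilds the same nested per-position letter counts in two phases (a flat event-stream counter, then one regroup pass) instead of A's single nested-increment pass; alternative decomposition, not faster.


-- string.ascii_lowercase
def asciiLowercase : List Char := "abcdefghijklmnopqrstuvwxyz".toList

-- ===== PORT A =====
-- A: one pass; for each word, for each (index, letter) of word.lower(), if the letter is an
-- ascii lowercase letter, increment position_counts[index][letter] (nested defaultdicts;
-- defaultdict access = modify with default empty / 0); return as dict of dicts (items lists).
def count_letter_positions (words : List String) : List (Int × List (String × Int)) :=
  let position_counts : PySem.Dict Int (PySem.Dict String Int) :=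
    words.foldl (fun pc word =>
      (PySem.List.enumerate (PySem.Str.lower word).toList).foldl (fun pc p =>
        if asciiLowercase.contains p.2 then
          pc.modify p.1 PySem.Dict.empty (fun inner => inner.modify (String.singleton p.2) 0 (· + 1))
        else pc) pc) PySem.Dict.empty
  position_counts.items.map (fun p => (p.1, p.2.items))

-- ===== PORT B =====
-- B: phase 1 flattens words to the (index, letter) event list (the comprehension) and counts it
-- once with Counter; phase 2 regroups flat.items into the nested dict
-- (position_counts.setdefault(index, defaultdict(int))[letter] = count, i.e. modify with default empty).
def count_letter_positions_alt (words : List String) : List (Int × List (String × Int)) :=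
  let events : List (Int × String) :=
    words.flatMap (fun word =>
      ((PySem.List.enumerate (PySem.Str.lower word).toList).filter
          (fun p => asciiLowercase.contains p.2)).map
        (fun p => (p.1, String.singleton p.2)))
  let flat := PySem.Dict.counter events
  let position_counts : PySem.Dict Int (PySem.Dict String Int) :=
    flat.items.foldl (fun out q =>
      out.modify q.1.1 PySem.Dict.empty (fun inner => inner.insert q.1.2 q.2)) PySem.Dict.empty
  position_counts.items.map (fun p => (p.1, p.2.items))

-- ===== PRECONDITION & SPEC =====
-- A is total: no Pre_.
def Spec_count_letter_positions (words : List String) (out : List (Int × List (String × Int))) : Prop :=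
  out = count_letter_positions_alt words
instance (words : List String) (out : List (Int × List (String × Int))) :
    Decidable (Spec_count_letter_positions words out) := by
  unfold Spec_count_letter_positions; infer_instance

-- ===== CLAIM =====
def Claim_equal_count_letter_positions : Prop :=
  ∀ (words : List String), Dom_count_letter_positions words →
    Spec_count_letter_positions words (count_letter_positions words)

-- ===== LEMMAS AND PROOFS =====

-- reverse (append-at-the-end) induction on lists
theorem pvRevRec {α : Type} {P : List α → Prop} (h0 : P [])
    (h1 : ∀ (l : List α) (x : α), P l → P (l ++ [x])) (l : List α) : P l := by
  rw [← l.reverse_reverse]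
  induction l.reverse with
  | nil => exact h0
  | cons x m ih => rw [List.reverse_cons]; exact h1 _ _ ih

def nstep (pc : PySem.Dict Int (PySem.Dict String Int)) (e : Int × String) :
    PySem.Dict Int (PySem.Dict String Int) :=
  pc.modify e.1 PySem.Dict.empty (fun inner => inner.modify e.2 0 (· + 1))

def rstep (out : PySem.Dict Int (PySem.Dict String Int)) (q : (Int × String) × Int) :
    PySem.Dict Int (PySem.Dict String Int) :=
  out.modify q.1.1 PySem.Dict.empty (fun inner => inner.insert q.1.2 q.2)

def eventsOf (words : List String) : List (Int × String) :=
  words.flatMap (fun word =>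
    ((PySem.List.enumerate (PySem.Str.lower word).toList).filter
        (fun p => asciiLowercase.contains p.2)).map
      (fun p => (p.1, String.singleton p.2)))

theorem set_ofList_filter {α : Type} [BEq α] [LawfulBEq α] (p : α → Bool) (l : List α) :
    (PySem.Set.ofList l).filter p = PySem.Set.ofList (l.filter p) := by
  induction l using pvRevRec with
  | h0 => rfl
  | h1 l x ih =>
    rw [PySem.Set.ofList_append_singleton, PySem.Set.add_eq_ite, List.filter_append]
    by_cases hx : x ∈ PySem.Set.ofList l
    · rw [if_pos hx]
      have hxl : x ∈ l := (PySem.Set.mem_ofList l x).1 hx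
      cases hpx : p x with
      | false => simp [List.filter, hpx, ih]
      | true =>
        have : List.filter p [x] = [x] := by simp [List.filter, hpx]
        rw [this, PySem.Set.ofList_append_singleton,
          PySem.Set.add_of_mem ((PySem.Set.mem_ofList _ x).2 (List.mem_filter.2 ⟨hxl, hpx⟩))]
        exact ih
    · rw [if_neg hx, List.filter_append]
      have hxl : x ∉ l := fun h => hx ((PySem.Set.mem_ofList l x).2 h)
      cases hpx : p x with
      | false => simp [List.filter, hpx, ih]
      | true =>
        have h1 : List.filter p [x] = [x] := by simp [List.filter, hpx]
        rw [h1, PySem.Set.ofList_append_singleton,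
          PySem.Set.add_of_not_mem (fun h => hxl (List.mem_filter.1 ((PySem.Set.mem_ofList _ x).1 h)).1)]
        rw [ih]

theorem set_ofList_map {α β : Type} [BEq α] [LawfulBEq α] [BEq β] [LawfulBEq β]
    (f : α → β) (l : List α) :
    PySem.Set.ofList ((PySem.Set.ofList l).map f) = PySem.Set.ofList (l.map f) := by
  induction l using pvRevRec with
  | h0 => rfl
  | h1 l x ih =>
    rw [PySem.Set.ofList_append_singleton]
    simp only [List.map_append, List.map_cons, List.map_nil]
    rw [PySem.Set.ofList_append_singleton]
    by_cases hx : x ∈ PySem.Set.ofList l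
    · rw [PySem.Set.add_of_mem hx, ih,
        PySem.Set.add_of_mem ((PySem.Set.mem_ofList _ (f x)).2
          (List.mem_map.2 ⟨x, (PySem.Set.mem_ofList l x).1 hx, rfl⟩))]
    · rw [PySem.Set.add_of_not_mem hx]
      simp only [List.map_append, List.map_cons, List.map_nil]
      rw [PySem.Set.ofList_append_singleton, ih]

theorem set_ofList_map_inj {α β : Type} [BEq α] [LawfulBEq α] [BEq β] [LawfulBEq β]
    (f : α → β) (l : List α) (hinj : ∀ a ∈ l, ∀ b ∈ l, f a = f b → a = b) :
    PySem.Set.ofList (l.map f) = (PySem.Set.ofList l).map f := by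
  induction l using pvRevRec with
  | h0 => rfl
  | h1 l x ih =>
    have hinj' : ∀ a ∈ l, ∀ b ∈ l, f a = f b → a = b := fun a ha b hb =>
      hinj a (List.mem_append_left _ ha) b (List.mem_append_left _ hb)
    simp only [List.map_append, List.map_cons, List.map_nil]
    rw [PySem.Set.ofList_append_singleton, PySem.Set.ofList_append_singleton]
    by_cases hx : x ∈ PySem.Set.ofList l
    · rw [PySem.Set.add_of_mem hx,
        PySem.Set.add_of_mem ((PySem.Set.mem_ofList _ (f x)).2
          (List.mem_map.2 ⟨x, (PySem.Set.mem_ofList l x).1 hx, rfl⟩)), ih hinj']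
    · have hfx : f x ∉ PySem.Set.ofList (l.map f) := by
        intro h
        rcases List.mem_map.1 ((PySem.Set.mem_ofList _ (f x)).1 h) with ⟨a, ha, hfa⟩
        have hax : a = x := hinj a (List.mem_append_left _ ha)
          x (List.mem_append_right _ (List.mem_singleton.2 rfl)) hfa
        exact hx ((PySem.Set.mem_ofList l x).2 (hax ▸ ha))
      rw [PySem.Set.add_of_not_mem hx, PySem.Set.add_of_not_mem hfx, ih hinj',
        List.map_append, List.map_cons, List.map_nil]

theorem nfold_items (evs : List (Int × String)) :
    (evs.foldl nstep PySem.Dict.empty).items =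
      (PySem.Set.ofList (evs.map Prod.fst)).map (fun i =>
        (i, PySem.Dict.counter ((evs.filter (fun e => e.1 == i)).map Prod.snd))) := by
  induction evs using pvRevRec with
  | h0 => rfl
  | h1 evs e ih =>
    rw [List.foldl_append]
    have hkeys : (evs.foldl nstep PySem.Dict.empty).keys
        = PySem.Set.ofList (evs.map Prod.fst) := by
      show (evs.foldl nstep PySem.Dict.empty).items.map (·.1) = _
      rw [ih, List.map_map]
      have h2 : ∀ s : List Int,
          s.map ((·.1) ∘ (fun i => (i, PySem.Dict.counter
            ((evs.filter (fun e => e.1 == i)).map Prod.snd)))) = s := by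
        intro s
        induction s with
        | nil => rfl
        | cons a t iht => rw [List.map_cons, iht]; rfl
      exact h2 _
    have hnd : (evs.foldl nstep PySem.Dict.empty).keys.Nodup := by
      rw [hkeys]; exact PySem.Set.nodup_ofList _
    show ((evs.foldl nstep PySem.Dict.empty).insert e.1
        (((evs.foldl nstep PySem.Dict.empty).getD e.1 PySem.Dict.empty).modify e.2 0 (· + 1))).items = _
    simp only [List.map_append, List.map_cons, List.map_nil]
    rw [PySem.Set.ofList_append_singleton]
    by_cases hmem : e.1 ∈ evs.map Prod.fst
    · have hcon : (evs.foldl nstep PySem.Dict.empty).contains e.1 = true := by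
        rw [PySem.Dict.contains_iff_mem_keys, hkeys]
        exact (PySem.Set.mem_ofList _ _).2 hmem
      have hget : (evs.foldl nstep PySem.Dict.empty).getD e.1 PySem.Dict.empty
          = PySem.Dict.counter ((evs.filter (fun q => q.1 == e.1)).map Prod.snd) := by
        apply PySem.Dict.getD_of_mem_items _ _ hnd
        rw [ih]
        exact List.mem_map.2 ⟨e.1, (PySem.Set.mem_ofList _ _).2 hmem, rfl⟩
      rw [PySem.Dict.items_insert_of_contains _ _ hcon, ih, hget,
        PySem.Set.add_of_mem ((PySem.Set.mem_ofList _ _).2 hmem), List.map_map]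
      apply List.map_congr_left
      intro i _
      simp only [Function.comp_apply]
      by_cases hi : i = e.1
      · have hbe2 : (e.1 == i) = true := beq_iff_eq.2 hi.symm
        have hf : List.filter (fun q => q.1 == i) (evs ++ [e]) =
            List.filter (fun q => q.1 == i) evs ++ [e] := by
          simp [List.filter_append, List.filter, hbe2]
        rw [hf, List.map_append, List.map_cons, List.map_nil,
          PySem.Dict.counter_append_singleton]
        simp [hi]
      · have hbe : (i == e.1) = false := beq_eq_false_iff_ne.2 hi
        have hbe2 : (e.1 == i) = false := beq_eq_false_iff_ne.2 (Ne.symm hi)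
        have hf : List.filter (fun q => q.1 == i) (evs ++ [e]) =
            List.filter (fun q => q.1 == i) evs := by
          simp [List.filter_append, List.filter, hbe2]
        rw [hf]
        simp [hbe]
    · have hcon : (evs.foldl nstep PySem.Dict.empty).contains e.1 = false := by
        cases h : (evs.foldl nstep PySem.Dict.empty).contains e.1
        · rfl
        · rw [PySem.Dict.contains_iff_mem_keys, hkeys] at h
          exact absurd ((PySem.Set.mem_ofList _ _).1 h) hmem
      have hget : (evs.foldl nstep PySem.Dict.empty).getD e.1 PySem.Dict.empty = PySem.Dict.empty :=
        PySem.Dict.getD_of_not_contains _ _ hcon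
      rw [PySem.Dict.items_insert_of_not_contains _ _ hcon, ih, hget,
        PySem.Set.add_of_not_mem (fun h => hmem ((PySem.Set.mem_ofList _ _).1 h)), List.map_append]
      congr 1
      · apply List.map_congr_left
        intro i hi
        have hil : i ∈ evs.map Prod.fst := (PySem.Set.mem_ofList _ _).1 hi
        have hne : (e.1 == i) = false := by
          refine beq_eq_false_iff_ne.2 ?_
          intro h; exact hmem (h ▸ hil)
        have hf : List.filter (fun q => q.1 == i) (evs ++ [e]) =
            List.filter (fun q => q.1 == i) evs := by
          simp [List.filter_append, List.filter, hne]
        rw [hf]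
      · have hfilt : evs.filter (fun q => q.1 == e.1) = [] := by
          rw [List.filter_eq_nil_iff]
          intro q hq hq1
          exact hmem (List.mem_map.2 ⟨q, hq, by simpa using hq1⟩)
        have hf : List.filter (fun q => q.1 == e.1) (evs ++ [e]) = [e] := by
          simp [List.filter_append, List.filter, hfilt]
        rw [List.map_cons, List.map_nil, hf, List.map_cons, List.map_nil]
        rfl

theorem map_fst_pairs {α β : Type} (g : α → β) (s : List α) :
    (s.map (fun i => (i, g i))).map (·.1) = s := by
  induction s with
  | nil => rfl
  | cons a t iht => rw [List.map_cons, List.map_cons, iht]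

theorem map_fst1_pairs {α γ β : Type} (g : α × γ → β) (s : List (α × γ)) :
    (s.map (fun k => (k, g k))).map (·.1.1) = s.map Prod.fst := by
  induction s with
  | nil => rfl
  | cons a t iht => rw [List.map_cons, List.map_cons, List.map_cons, iht]

theorem rfold_items (ps : List ((Int × String) × Int)) (hnd : (ps.map (·.1)).Nodup) :
    (ps.foldl rstep PySem.Dict.empty).items =
      (PySem.Set.ofList (ps.map (·.1.1))).map (fun i =>
        (i, PySem.Dict.mk ((ps.filter (fun q => q.1.1 == i)).map (fun q => (q.1.2, q.2))))) := by
  induction ps using pvRevRec with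
  | h0 => rfl
  | h1 ps q ih =>
    rw [List.map_append, List.map_cons, List.map_nil] at hnd
    have hnodup := (List.nodup_append.1 hnd)
    have hnd' : (ps.map (·.1)).Nodup := hnodup.1
    have hq1 : q.1 ∉ ps.map (·.1) := by
      intro hm
      exact hnodup.2.2 _ hm _ (List.mem_singleton.2 rfl) rfl
    rw [List.foldl_append]
    have hkeys : (ps.foldl rstep PySem.Dict.empty).keys
        = PySem.Set.ofList (ps.map (·.1.1)) := by
      show (ps.foldl rstep PySem.Dict.empty).items.map (·.1) = _
      rw [ih hnd', map_fst_pairs]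
    have hndk : (ps.foldl rstep PySem.Dict.empty).keys.Nodup := by
      rw [hkeys]; exact PySem.Set.nodup_ofList _
    show ((ps.foldl rstep PySem.Dict.empty).insert q.1.1
        (((ps.foldl rstep PySem.Dict.empty).getD q.1.1 PySem.Dict.empty).insert q.1.2 q.2)).items = _
    simp only [List.map_append, List.map_cons, List.map_nil]
    rw [PySem.Set.ofList_append_singleton]
    by_cases hmem : q.1.1 ∈ ps.map (·.1.1)
    · have hcon : (ps.foldl rstep PySem.Dict.empty).contains q.1.1 = true := by
        rw [PySem.Dict.contains_iff_mem_keys, hkeys]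
        exact (PySem.Set.mem_ofList _ _).2 hmem
      have hget : (ps.foldl rstep PySem.Dict.empty).getD q.1.1 PySem.Dict.empty
          = PySem.Dict.mk ((ps.filter (fun r => r.1.1 == q.1.1)).map (fun r => (r.1.2, r.2))) := by
        apply PySem.Dict.getD_of_mem_items _ _ hndk
        rw [ih hnd']
        exact List.mem_map.2 ⟨q.1.1, (PySem.Set.mem_ofList _ _).2 hmem, rfl⟩
      have hnc : (PySem.Dict.mk ((ps.filter (fun r => r.1.1 == q.1.1)).map
          (fun r => (r.1.2, r.2)))).contains q.1.2 = false := by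
        rw [PySem.Dict.contains_mk, List.any_eq_false]
        intro x hx
        rcases List.mem_map.1 hx with ⟨r, hr, hrx⟩
        have hr1 : (r.1.1 == q.1.1) = true := (List.mem_filter.1 hr).2
        intro hx2
        apply hq1
        refine List.mem_map.2 ⟨r, (List.mem_filter.1 hr).1, ?_⟩
        have h1 : r.1.1 = q.1.1 := beq_iff_eq.1 hr1
        have h2 : r.1.2 = q.1.2 := by
          rw [← hrx] at hx2; exact beq_iff_eq.1 hx2
        exact Prod.ext h1 h2
      have hins : (PySem.Dict.mk ((ps.filter (fun r => r.1.1 == q.1.1)).map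
            (fun r => (r.1.2, r.2)))).insert q.1.2 q.2
          = PySem.Dict.mk ((ps.filter (fun r => r.1.1 == q.1.1)).map (fun r => (r.1.2, r.2))
              ++ [(q.1.2, q.2)]) :=
        PySem.Dict.ext (PySem.Dict.items_insert_of_not_contains _ _ hnc)
      rw [PySem.Dict.items_insert_of_contains _ _ hcon, ih hnd', hget, hins,
        PySem.Set.add_of_mem ((PySem.Set.mem_ofList _ _).2 hmem), List.map_map]
      apply List.map_congr_left
      intro i _
      simp only [Function.comp_apply]
      by_cases hi : i = q.1.1
      · have hbe2 : (q.1.1 == i) = true := beq_iff_eq.2 hi.symm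
        have hf : List.filter (fun r => r.1.1 == i) (ps ++ [q]) =
            List.filter (fun r => r.1.1 == i) ps ++ [q] := by
          simp [List.filter_append, List.filter, hbe2]
        rw [hf, List.map_append, List.map_cons, List.map_nil]
        simp [hi]
      · have hbe : (i == q.1.1) = false := beq_eq_false_iff_ne.2 hi
        have hbe2 : (q.1.1 == i) = false := beq_eq_false_iff_ne.2 (Ne.symm hi)
        have hf : List.filter (fun r => r.1.1 == i) (ps ++ [q]) =
            List.filter (fun r => r.1.1 == i) ps := by
          simp [List.filter_append, List.filter, hbe2]
        rw [hf]
        simp [hbe]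
    · have hcon : (ps.foldl rstep PySem.Dict.empty).contains q.1.1 = false := by
        cases h : (ps.foldl rstep PySem.Dict.empty).contains q.1.1
        · rfl
        · rw [PySem.Dict.contains_iff_mem_keys, hkeys] at h
          exact absurd ((PySem.Set.mem_ofList _ _).1 h) hmem
      have hget : (ps.foldl rstep PySem.Dict.empty).getD q.1.1 PySem.Dict.empty
          = PySem.Dict.empty := PySem.Dict.getD_of_not_contains _ _ hcon
      have hins : PySem.Dict.empty.insert q.1.2 q.2 = PySem.Dict.mk [(q.1.2, q.2)] :=
        PySem.Dict.ext (PySem.Dict.items_insert_of_not_contains _ _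
          (PySem.Dict.contains_empty _))
      rw [PySem.Dict.items_insert_of_not_contains _ _ hcon, ih hnd', hget, hins,
        PySem.Set.add_of_not_mem (fun h => hmem ((PySem.Set.mem_ofList _ _).1 h)),
        List.map_append, List.map_cons, List.map_nil]
      congr 1
      · apply List.map_congr_left
        intro i hi
        have hil : i ∈ ps.map (·.1.1) := (PySem.Set.mem_ofList _ _).1 hi
        have hne : (q.1.1 == i) = false := by
          refine beq_eq_false_iff_ne.2 ?_
          intro h; exact hmem (h ▸ hil)
        have hf : List.filter (fun r => r.1.1 == i) (ps ++ [q]) =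
            List.filter (fun r => r.1.1 == i) ps := by
          simp [List.filter_append, List.filter, hne]
        rw [hf]
      · have hfilt : ps.filter (fun r => r.1.1 == q.1.1) = [] := by
          rw [List.filter_eq_nil_iff]
          intro r hr hr1
          exact hmem (List.mem_map.2 ⟨r, hr, beq_iff_eq.1 hr1⟩)
        have hf : List.filter (fun r => r.1.1 == q.1.1) (ps ++ [q]) = [q] := by
          simp [List.filter_append, List.filter, hfilt]
        rw [hf, List.map_cons, List.map_nil]

theorem a_as_fold (words : List String) :
    count_letter_positions words =
      ((eventsOf words).foldl nstep PySem.Dict.empty).items.map (fun p => (p.1, p.2.items)) := by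
  unfold count_letter_positions eventsOf
  rw [List.foldl_flatMap]
  simp only [List.foldl_map, List.foldl_filter]
  rfl

theorem count_snd (evs : List (Int × String)) (i : Int) (k : Int × String) (hk1 : k.1 = i) :
    ((evs.filter (fun e => e.1 == i)).map Prod.snd).count k.2 = evs.count k := by
  rw [List.count_eq_countP, List.count_eq_countP, List.countP_map, List.countP_filter]
  apply List.countP_congr
  intro r _
  show ((r.2 == k.2) && (r.1 == i)) = true ↔ (r == k) = true
  subst hk1
  show ((r.2 == k.2) && (r.1 == k.1)) = true ↔ ((r.1 == k.1) && (r.2 == k.2)) = true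
  rw [Bool.and_comm]

theorem entry_eq (evs : List (Int × String)) (i : Int) :
    (PySem.Dict.counter ((evs.filter (fun e => e.1 == i)).map Prod.snd)).items
      = (((PySem.Set.ofList evs).map (fun k => (k, (evs.count k : Int)))).filter
          (fun r => r.1.1 == i)).map (fun r => (r.1.2, r.2)) := by
  rw [List.filter_map, List.map_map, set_ofList_filter, PySem.Dict.items_counter]
  have hinj : ∀ a ∈ evs.filter (fun e => e.1 == i), ∀ b ∈ evs.filter (fun e => e.1 == i),
      Prod.snd a = Prod.snd b → a = b := by
    intro a ha b hb hab
    have ha1 : a.1 = i := beq_iff_eq.1 (List.mem_filter.1 ha).2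
    have hb1 : b.1 = i := beq_iff_eq.1 (List.mem_filter.1 hb).2
    exact Prod.ext (ha1.trans hb1.symm) hab
  rw [set_ofList_map_inj Prod.snd _ hinj, List.map_map]
  apply List.map_congr_left
  intro k hk
  have hkX : k ∈ evs.filter (fun e => e.1 == i) := (PySem.Set.mem_ofList _ _).1 hk
  have hk1 : k.1 = i := beq_iff_eq.1 (List.mem_filter.1 hkX).2
  simp only [Function.comp_apply]
  rw [count_snd evs i k hk1]

theorem main_eq (words : List String) :
    count_letter_positions words = count_letter_positions_alt words := by
  rw [a_as_fold]
  show _ = ((PySem.Dict.counter (eventsOf words)).items.foldl rstep PySem.Dict.empty).items.map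
    (fun p => (p.1, p.2.items))
  rw [nfold_items, PySem.Dict.items_counter]
  have hnd : (((PySem.Set.ofList (eventsOf words)).map
      (fun k => (k, ((eventsOf words).count k : Int)))).map (·.1)).Nodup := by
    rw [map_fst_pairs]
    exact PySem.Set.nodup_ofList _
  rw [rfold_items _ hnd]
  rw [map_fst1_pairs, set_ofList_map, List.map_map, List.map_map]
  apply List.map_congr_left
  intro i _
  simp only [Function.comp_apply]
  rw [entry_eq]

-- ===== VERDICT =====
theorem count_letter_positions_spec : Claim_equal_count_letter_positions := by
  intro words _
  show count_letter_positions words = count_letter_positions_alt words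
  exact main_eq words
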